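-- pv_equiv track=rewrite | github.com/wrbell/stark-translate | tests/test_kpi_report.py | _make_rows
-- ===== SOURCE A (Python) =====
-- def _make_rows(e2e_values, stt_values=None):
--     rows = []
--     for i, e2e in enumerate(e2e_values):
--         row = {"e2e_latency_ms": str(e2e), "chunk_id": str(i + 1)}
--         if stt_values and i < len(stt_values):
--             row["stt_latency_ms"] = str(stt_values[i])
--         rows.append(row)
--     return rows
-- ===== SOURCE B (Python) =====
-- def _make_rows(e2e_values, stt_values=None):
--     n = len(e2e_values)
--     cols = {
--         "e2e_latency_ms": [str(v) for v in e2e_values],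
--         "chunk_id": [str(i) for i in range(1, n + 1)],
--         "stt_latency_ms": [str(v) for v in (stt_values or [])[:n]],
--     }
--     return [{k: col[i] for k, col in cols.items() if i < len(col)}
--             for i in range(n)]
-- ===== Notes on version B (the rewrite author's own statement) =====
-- stated objective: alternative
-- what changed: Replaces A's row-wise loop (index-guarded lookup into stt_values while building each dict) by a columnar algorithm: build three column lists (e2e strings, chunk ids, stt strings truncated to len(e2e_values)), then transpose them into row dicts with a per-index dict comprehension that keeps a key only while its column is long enough.
import Mathlib
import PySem

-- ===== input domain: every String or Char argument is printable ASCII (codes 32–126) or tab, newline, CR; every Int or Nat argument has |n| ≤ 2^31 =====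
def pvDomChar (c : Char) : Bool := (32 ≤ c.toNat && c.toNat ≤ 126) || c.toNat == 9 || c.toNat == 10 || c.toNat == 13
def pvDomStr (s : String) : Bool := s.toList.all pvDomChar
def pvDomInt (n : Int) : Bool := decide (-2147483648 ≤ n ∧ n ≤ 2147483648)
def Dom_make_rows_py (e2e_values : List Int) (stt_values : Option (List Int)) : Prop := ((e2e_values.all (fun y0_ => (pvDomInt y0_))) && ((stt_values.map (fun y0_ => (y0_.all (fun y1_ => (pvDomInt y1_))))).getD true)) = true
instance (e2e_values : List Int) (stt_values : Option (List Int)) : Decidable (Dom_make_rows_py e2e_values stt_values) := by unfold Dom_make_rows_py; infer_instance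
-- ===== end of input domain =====

-- Header: B is columnar — it builds three column lists (e2e strings, chunk ids, truncated stt
-- strings) and transposes them into row dicts, instead of A's single row-wise index-guarded loop.


-- ===== PORT A =====
-- literal transliteration of A: one loop over enumerate(e2e_values), building each row and
-- conditionally adding the stt key (guard 'stt_values and i < len(stt_values)')
def make_rows_py (e2e_values : List Int) (stt_values : Option (List Int)) : List (List (String × String)) :=
  (PySem.List.enumerate e2e_values 0).foldl
    (fun rows p =>
      let row : List (String × String) :=
        [("e2e_latency_ms", PySem.Int.toStr p.2), ("chunk_id", PySem.Int.toStr (p.1 + 1))]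
      let row :=
        match stt_values with
        | some s =>
          if s ≠ [] ∧ p.1 < (s.length : Int) then
            row ++ [("stt_latency_ms", PySem.Int.toStr (PySem.List.pyGetD s p.1 0))]
          else row
        | none => row
      rows ++ [row]) []

-- ===== PORT B =====
-- B-side helpers: the column table and the per-index transpose (the dict comprehension)
def pvCols (e2e_values : List Int) (s : List Int) : List (String × List String) :=
  [("e2e_latency_ms", e2e_values.map PySem.Int.toStr),
   ("chunk_id", (PySem.List.pyRange 1 ((e2e_values.length : Int) + 1) 1).map PySem.Int.toStr),
   ("stt_latency_ms", (PySem.List.slice s none (some (e2e_values.length : Int))).map PySem.Int.toStr)]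

def pvRowB (cols : List (String × List String)) (i : Int) : List (String × String) :=
  (cols.filter (fun p => i < (p.2.length : Int))).map (fun p => (p.1, PySem.List.pyGetD p.2 i ""))

def make_rows_py_alt (e2e_values : List Int) (stt_values : Option (List Int)) : List (List (String × String)) :=
  let s : List Int := match stt_values with | some s => if s ≠ [] then s else [] | none => []
  let cols := pvCols e2e_values s
  (PySem.List.pyRange 0 (e2e_values.length : Int) 1).map (pvRowB cols)

-- ===== PRECONDITION & SPEC =====
def Spec_make_rows_py (e2e_values : List Int) (stt_values : Option (List Int)) (out : List (List (String × String))) : Prop := out = make_rows_py_alt e2e_values stt_values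
instance (e2e_values : List Int) (stt_values : Option (List Int)) (out : List (List (String × String))) : Decidable (Spec_make_rows_py e2e_values stt_values out) := by unfold Spec_make_rows_py; infer_instance

-- ===== CLAIM (what is proved, stated in full; the proofs are below) =====
def Claim_equal_make_rows_py : Prop := ∀ (e2e_values : List Int) (stt_values : Option (List Int)), Dom_make_rows_py e2e_values stt_values → Spec_make_rows_py e2e_values stt_values (make_rows_py e2e_values stt_values)

-- ===== LEMMAS AND PROOFS =====

-- A's row function, written with an explicit stt list (A's some-branch; s = [] gives the none-branch)
def pvRowA (s : List Int) (p : Int × Int) : List (String × String) :=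
  let row : List (String × String) :=
    [("e2e_latency_ms", PySem.Int.toStr p.2), ("chunk_id", PySem.Int.toStr (p.1 + 1))]
  if s ≠ [] ∧ p.1 < (s.length : Int) then
    row ++ [("stt_latency_ms", PySem.Int.toStr (PySem.List.pyGetD s p.1 0))]
  else row

-- the map form of A's foldl, with the stt option normalised to the list B uses for its stt column
theorem make_rows_py_eq_map (e2e_values : List Int) (stt_values : Option (List Int)) :
    make_rows_py e2e_values stt_values =
      (PySem.List.enumerate e2e_values 0).map
        (pvRowA (match stt_values with | some s => if s ≠ [] then s else [] | none => [])) := by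
  rw [make_rows_py, PySem.List.foldl_append_singleton_eq_map, List.nil_append]
  apply List.map_congr_left
  intro p _
  cases stt_values with
  | none => simp [pvRowA]
  | some s =>
    cases s with
    | nil => simp [pvRowA]
    | cons t ts => simp [pvRowA]

-- pointwise: A's row at index j equals B's transposed row at index j
theorem pvRowA_eq_pvRowB (s e2e_values : List Int) (j : Nat) (hj : j < e2e_values.length) :
    pvRowA s ((j : Int), e2e_values[j]) = pvRowB (pvCols e2e_values s) (j : Int) := by
  have hn : PySem.List.slice s none (some (e2e_values.length : Int)) = s.take e2e_values.length := by
    rw [show ((e2e_values.length : Int)) = ((e2e_values.length : Nat) : Int) from rfl,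
      PySem.List.slice_to_natCast]
  rw [pvRowB, pvCols, hn]
  by_cases hs : j < s.length
  · have hguard : (s ≠ [] ∧ (j : Int) < (s.length : Int)) :=
      ⟨fun h => by subst h; simp at hs, by exact_mod_cast hs⟩
    simp only [pvRowA, if_pos hguard]
    simp [PySem.List.length_pyRange_one, hj, hs]
    rw [Int.add_comm]
  · have hguard : ¬ (s ≠ [] ∧ (j : Int) < (s.length : Int)) := by rintro ⟨_, h⟩; omega
    simp only [pvRowA, if_neg hguard]
    simp [PySem.List.length_pyRange_one, hj, hs]
    rw [Int.add_comm]

-- ===== VERDICT (by name: the statement is the Claim_ definition above) =====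
theorem make_rows_py_spec : Claim_equal_make_rows_py := by
  intro e2e_values stt_values _
  show make_rows_py e2e_values stt_values = make_rows_py_alt e2e_values stt_values
  rw [make_rows_py_eq_map]
  unfold make_rows_py_alt
  apply List.ext_getElem?
  intro j
  rw [List.getElem?_map, List.getElem?_map]
  by_cases hj : j < e2e_values.length
  · rw [PySem.List.getElem?_enumerate, List.getElem?_eq_getElem hj,
      PySem.List.getElem?_pyRange_one]
    simp only [Option.map_some]
    split_ifs with h
    · simp only [Option.map_some, Option.some.injEq, zero_add]
      exact pvRowA_eq_pvRowB _ e2e_values j hj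
    · exfalso; apply h; omega
  · rw [PySem.List.getElem?_enumerate, List.getElem?_eq_none (by omega),
      PySem.List.getElem?_pyRange_one]
    simp only [Option.map_none]
    split_ifs with h
    · exfalso; omega
    · rfl
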